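-- pv_equiv track=rewrite | github.com/F1scherman/AdventOfCode2023 | Dec13/Dec13P1.py | search_for_mirrors
-- ===== SOURCE A (Python) =====
-- def search_for_mirrors(arr: [int]):
--     current_index = 0
--     while current_index < len(arr) - 1:
--         if arr[current_index] == arr[current_index + 1]:
--             offset = 1
--             valid_num = True
--             while 0 <= current_index - offset and current_index + 1 + offset < len(arr):
--                 if arr[current_index - offset] != arr[current_index + 1 + offset]:
--                     valid_num = False
--                     break
--                 offset += 1
--             if valid_num:
--                 return current_index + 1
--         current_index += 1
--     return 0
-- ===== SOURCE B (Python) =====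
-- def search_for_mirrors(arr: [int]):
--     n = len(arr)
--     for k in range(1, n):
--         m = min(k, n - k)
--         if arr[:k][::-1][:m] == arr[k:][:m]:
--             return k
--     return 0
-- ===== Notes on version B (the rewrite author's own statement) =====
-- stated objective: simpler
-- what changed: Replaces the hand-written two-level index/offset scan with a single pass over split points that compares the reversed left prefix with the right suffix by slice equality.
import Mathlib
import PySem

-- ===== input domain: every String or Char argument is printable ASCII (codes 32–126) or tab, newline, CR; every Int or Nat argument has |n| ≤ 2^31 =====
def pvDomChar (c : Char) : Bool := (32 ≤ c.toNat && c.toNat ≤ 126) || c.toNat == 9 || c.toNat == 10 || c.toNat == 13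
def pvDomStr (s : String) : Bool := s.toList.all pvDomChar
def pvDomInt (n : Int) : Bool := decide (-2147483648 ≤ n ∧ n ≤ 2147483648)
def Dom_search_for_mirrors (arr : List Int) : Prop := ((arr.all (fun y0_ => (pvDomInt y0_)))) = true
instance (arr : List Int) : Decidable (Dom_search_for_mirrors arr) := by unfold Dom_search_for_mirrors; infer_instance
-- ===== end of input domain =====

-- B replaces A's two-level index/offset scan with one pass over split points using slice comparison; objective: simpler.

-- ===== PORT A =====
-- inner while loop of A (offset scan); fuel = arr.length bounds the iterations, every index A reads is in range so List.getD is exact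
def pvInnerA (arr : List Int) (i : Nat) : Nat → Nat → Bool
  | 0, _ => true
  | fuel + 1, offset =>
    if offset ≤ i ∧ i + 1 + offset < arr.length then
      if arr.getD (i - offset) 0 ≠ arr.getD (i + 1 + offset) 0 then false
      else pvInnerA arr i fuel (offset + 1)
    else true

-- outer while loop of A over current_index; fuel = arr.length bounds the iterations
def pvOuterA (arr : List Int) : Nat → Nat → Int
  | 0, _ => 0
  | fuel + 1, i =>
    if i < arr.length - 1 then
      if arr.getD i 0 = arr.getD (i + 1) 0 then
        if pvInnerA arr i arr.length 1 then (i : Int) + 1 else pvOuterA arr fuel (i + 1)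
      else pvOuterA arr fuel (i + 1)
    else 0

def search_for_mirrors (arr : List Int) : Int := pvOuterA arr arr.length 0

-- ===== PORT B =====
-- for k in range(1, n): compare arr[:k][::-1][:m] with arr[k:][:m], m = min(k, n-k); fuel = arr.length bounds the iterations
def pvLoopB (arr : List Int) : Nat → Nat → Int
  | 0, _ => 0
  | fuel + 1, k =>
    if k < arr.length then
      let m := min k (arr.length - k)
      if ((arr.take k).reverse.take m) = ((arr.drop k).take m) then (k : Int)
      else pvLoopB arr fuel (k + 1)
    else 0

def search_for_mirrors_alt (arr : List Int) : Int := pvLoopB arr arr.length 1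

-- ===== PRECONDITION & SPEC =====
def Spec_search_for_mirrors (arr : List Int) (out : Int) : Prop := out = search_for_mirrors_alt arr
instance (arr : List Int) (out : Int) : Decidable (Spec_search_for_mirrors arr out) := by unfold Spec_search_for_mirrors; infer_instance

-- ===== CLAIM (what is proved, stated in full; the proofs are below) =====
def Claim_equal_search_for_mirrors : Prop := ∀ (arr : List Int), Dom_search_for_mirrors arr → Spec_search_for_mirrors arr (search_for_mirrors arr)

-- ===== LEMMAS AND PROOFS =====

-- A's inner loop succeeds iff every in-range mirrored pair at distance ≥ offset agrees (fuel sufficient)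
theorem pvInnerA_iff (arr : List Int) (i : Nat) :
    ∀ fuel offset, arr.length ≤ fuel + offset →
      (pvInnerA arr i fuel offset = true ↔
        ∀ t, offset ≤ t → t ≤ i → i + 1 + t < arr.length →
          arr.getD (i - t) 0 = arr.getD (i + 1 + t) 0) := by
  intro fuel
  induction fuel with
  | zero =>
      intro offset hf
      simp only [pvInnerA]
      constructor
      · intro _ t h1 _ h3; omega
      · intro _; trivial
  | succ fuel ih =>
      intro offset hf
      simp only [pvInnerA]
      by_cases hg : offset ≤ i ∧ i + 1 + offset < arr.length
      · rw [if_pos hg]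
        by_cases hne : arr.getD (i - offset) 0 ≠ arr.getD (i + 1 + offset) 0
        · rw [if_pos hne]
          constructor
          · intro h; simp at h
          · intro h; exact absurd (h offset le_rfl hg.1 hg.2) hne
        · rw [if_neg hne, ih (offset + 1) (by omega)]
          have heq : arr.getD (i - offset) 0 = arr.getD (i + 1 + offset) 0 := not_not.mp hne
          constructor
          · intro h t h1 h2 h3
            rcases Nat.eq_or_lt_of_le h1 with rfl | hlt
            · exact heq
            · exact h t hlt h2 h3
          · intro h t h1 h2 h3
            exact h t (Nat.le_of_succ_le h1) h2 h3
      · rw [if_neg hg]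
        constructor
        · intro _ t h1 h2 h3
          exact absurd ⟨le_trans h1 h2, by omega⟩ hg
        · intro _; trivial

-- B's slice comparison at split k ↔ pointwise mirrored agreement for j < m
theorem sliceEq_iff (arr : List Int) (k : Nat) (hk : 0 < k) (hkn : k < arr.length) :
    ((arr.take k).reverse.take (min k (arr.length - k)) = (arr.drop k).take (min k (arr.length - k))) ↔
      ∀ j, j < min k (arr.length - k) → arr.getD (k - 1 - j) 0 = arr.getD (k + j) 0 := by
  set m := min k (arr.length - k) with hm
  have hLj : ∀ j, j < m → ((arr.take k).reverse.take m)[j]? = arr[k - 1 - j]? := by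
    intro j hj
    rw [List.getElem?_take_of_lt hj, List.getElem?_reverse (by simp; omega), List.length_take]
    have e : min k arr.length - 1 - j = k - 1 - j := by omega
    rw [e, List.getElem?_take_of_lt (by omega)]
  have hRj : ∀ j, j < m → ((arr.drop k).take m)[j]? = arr[k + j]? := by
    intro j hj
    rw [List.getElem?_take_of_lt hj, List.getElem?_drop]
  have hLlen : ((arr.take k).reverse.take m).length = m := by simp; omega
  have hRlen : ((arr.drop k).take m).length = m := by simp; omega
  constructor
  · intro h j hj
    have h2 := congrArg (fun l => l[j]?) h
    simp only at h2
    rw [hLj j hj, hRj j hj] at h2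
    rw [List.getD_eq_getElem _ _ (by omega : k - 1 - j < arr.length),
        List.getD_eq_getElem _ _ (by omega : k + j < arr.length)]
    rw [List.getElem?_eq_getElem (by omega : k - 1 - j < arr.length),
        List.getElem?_eq_getElem (by omega : k + j < arr.length)] at h2
    exact Option.some_injective _ h2
  · intro h
    apply List.ext_getElem?
    intro j
    by_cases hj : j < m
    · rw [hLj j hj, hRj j hj]
      have := h j hj
      rw [List.getD_eq_getElem _ _ (by omega : k - 1 - j < arr.length),
          List.getD_eq_getElem _ _ (by omega : k + j < arr.length)] at this
      rw [List.getElem?_eq_getElem (by omega : k - 1 - j < arr.length),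
          List.getElem?_eq_getElem (by omega : k + j < arr.length)]
      exact congrArg some this
    · rw [List.getElem?_eq_none (by omega : ((arr.take k).reverse.take m).length ≤ j),
          List.getElem?_eq_none (by omega : ((arr.drop k).take m).length ≤ j)]

-- the two loop bodies agree: A's condition at i equals B's condition at k = i+1
theorem cond_eq (arr : List Int) (i : Nat) (hi : i + 1 < arr.length) :
    (arr.getD i 0 = arr.getD (i + 1) 0 ∧ pvInnerA arr i arr.length 1 = true) ↔
      ((arr.take (i+1)).reverse.take (min (i+1) (arr.length - (i+1))) =
        (arr.drop (i+1)).take (min (i+1) (arr.length - (i+1)))) := by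
  rw [sliceEq_iff arr (i+1) (by omega) hi, pvInnerA_iff arr i arr.length 1 (by omega)]
  constructor
  · rintro ⟨h0, h⟩ j hj
    cases j with
    | zero => simpa using h0
    | succ t =>
        have e1 : i + 1 - 1 - (t+1) = i - (t+1) := by omega
        rw [e1]
        exact h (t+1) (by omega) (by omega) (by omega)
  · intro h
    constructor
    · have := h 0 (by omega)
      simpa using this
    · intro t h1 h2 h3
      have := h t (by omega)
      have e1 : i + 1 - 1 - t = i - t := by omega
      rw [e1] at this
      exact this

-- the two loops agree step for step (same fuel, B's index one ahead of A's)
theorem loop_eq (arr : List Int) : ∀ fuel i, pvOuterA arr fuel i = pvLoopB arr fuel (i + 1) := by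
  intro fuel
  induction fuel with
  | zero => intro i; rfl
  | succ fuel ih =>
      intro i
      simp only [pvOuterA, pvLoopB]
      by_cases hk : i + 1 < arr.length
      · rw [if_pos (by omega : i < arr.length - 1), if_pos hk]
        by_cases hc : ((arr.take (i+1)).reverse.take (min (i+1) (arr.length - (i+1))) =
            (arr.drop (i+1)).take (min (i+1) (arr.length - (i+1))))
        · obtain ⟨hhead, hinner⟩ := (cond_eq arr i hk).2 hc
          rw [if_pos hhead, if_pos hinner, if_pos hc]
          push_cast; ring
        · rw [if_neg hc]
          by_cases hhead : arr.getD i 0 = arr.getD (i + 1) 0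
          · rw [if_pos hhead]
            have hinner : ¬ pvInnerA arr i arr.length 1 = true := fun h =>
              hc ((cond_eq arr i hk).1 ⟨hhead, h⟩)
            rw [if_neg (by simpa using hinner), ih]
          · rw [if_neg hhead, ih]
      · rw [if_neg (by omega : ¬ i < arr.length - 1), if_neg hk]

-- ===== VERDICT (by name: the statement is the Claim_ definition above) =====
theorem search_for_mirrors_spec : Claim_equal_search_for_mirrors := by
  intro arr _
  unfold Spec_search_for_mirrors search_for_mirrors search_for_mirrors_alt
  exact loop_eq arr arr.length 0
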